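-- pv_equiv track=rewrite | github.com/Practice-Coding-Test/Weekly_Coding_Test | 12week/12week_kes.py | solution
-- ===== SOURCE A (Python) =====
-- def solution(k, dungeons):
--     import itertools
--
--     result = list(itertools.permutations(dungeons, len(dungeons)))
--
--     ans = 0
--     for seqes in result:
--         tmp_k = k
--         for i in range(len(dungeons)):
--             if tmp_k >= seqes[i][0]:
--                 tmp_k -= seqes[i][1]
--             else:
--                 i -= 1
--                 break
--         tmp = i + 1
--         ans = max(ans, tmp)
--
--     return ans
-- ===== SOURCE B (Python) =====
-- def solution(k, dungeons):
--     # Depth-first backtracking over the remaining dungeons: recurse only on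
--     # currently affordable dungeons, never materializing permutations.
--     def dfs(energy, rem):
--         best = 0
--         for i in range(len(rem)):
--             if rem[i][0] <= energy:
--                 best = max(best, 1 + dfs(energy - rem[i][1], rem[:i] + rem[i + 1:]))
--         return best
--     return dfs(k, dungeons)
-- ===== Notes on version B (the rewrite author's own statement) =====
-- stated objective: alternative
-- what changed: B replaces A's materialization of all n! permutations (each re-scanned greedily from the start) by a recursive depth-first backtracking over the remaining dungeons that recurses only on currently affordable dungeons, sharing common prefixes and pruning infeasible orders.
-- outside the precondition, e.g. on solution(0, [[5]]): A returns 0, B returns 0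
import Mathlib
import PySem

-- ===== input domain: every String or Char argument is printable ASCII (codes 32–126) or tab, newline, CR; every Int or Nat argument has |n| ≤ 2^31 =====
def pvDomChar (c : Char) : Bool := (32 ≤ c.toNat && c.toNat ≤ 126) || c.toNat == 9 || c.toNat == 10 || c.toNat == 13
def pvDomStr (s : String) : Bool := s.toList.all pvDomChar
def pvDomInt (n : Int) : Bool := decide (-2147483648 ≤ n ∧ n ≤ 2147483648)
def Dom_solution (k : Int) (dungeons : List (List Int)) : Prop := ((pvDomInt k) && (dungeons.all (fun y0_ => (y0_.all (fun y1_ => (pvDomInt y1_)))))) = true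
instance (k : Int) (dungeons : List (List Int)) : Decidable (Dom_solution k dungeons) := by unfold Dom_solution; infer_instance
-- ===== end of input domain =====

-- B replaces A's enumeration of all n! permutations by depth-first backtracking over the
-- remaining dungeons that recurses only on currently affordable dungeons (pruning).

-- ===== PORT A =====
-- A's inner 'for i in range(len(dungeons))' over seqes with its break/'i -= 1' bookkeeping:
-- returns tmp = the number of dungeons cleared before the break (count accumulator = i+1 so far).
def solInner (tmpK : Int) (seqes : List (List Int)) (count : Int) : Int :=
  match seqes with
  | [] => count
  | d :: rest =>
    if PySem.List.pyGetD d 0 0 ≤ tmpK then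
      solInner (tmpK - PySem.List.pyGetD d 1 0) rest (count + 1)
    else count

def solution (k : Int) (dungeons : List (List Int)) : Int :=
  let result := PySem.List.permutations dungeons dungeons.length
  result.foldl (fun ans seqes => max ans (solInner k seqes 0)) 0

-- ===== PORT B =====
-- Source B's dfs: for i in range(len(rem)), recurse on rem[:i] + rem[i+1:] when affordable.
def solDfs (energy : Int) (rem : List (List Int)) : Int :=
  (List.range rem.length).attach.foldl
    (fun best i =>
      let d := rem.getD i.1 []
      if PySem.List.pyGetD d 0 0 ≤ energy then
        max best (1 + solDfs (energy - PySem.List.pyGetD d 1 0) (rem.eraseIdx i.1))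
      else best) 0
termination_by rem.length
decreasing_by
  have hi : i.1 < rem.length := List.mem_range.mp i.2
  have := List.length_eraseIdx_of_lt hi
  omega

def solution_alt (k : Int) (dungeons : List (List Int)) : Int :=
  solDfs k dungeons

-- ===== PRECONDITION & SPEC =====
-- Pre_ restricts inputs to a nonempty list of well-formed (requirement, cost) records of
-- length ≥ 2: on the empty list A raises NameError, and a shorter record makes both programs
-- raise IndexError as soon as it becomes affordable (on malformed inputs where no such record
-- is ever affordable A happens to return, and B returns the same value there).
def Pre_solution (k : Int) (dungeons : List (List Int)) : Prop :=
  dungeons ≠ [] ∧ ∀ d ∈ dungeons, 2 ≤ d.length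
instance (k : Int) (dungeons : List (List Int)) : Decidable (Pre_solution k dungeons) := by
  unfold Pre_solution; infer_instance

def pvWitness_solution : Int × List (List Int) := (10, [[4, 3], [5, 1]])

def Spec_solution (k : Int) (dungeons : List (List Int)) (out : Int) : Prop := out = solution_alt k dungeons
instance (k : Int) (dungeons : List (List Int)) (out : Int) : Decidable (Spec_solution k dungeons out) := by unfold Spec_solution; infer_instance

-- ===== CLAIM (what is proved, stated in full; the proofs are below) =====
def Claim_equal_solution : Prop := ∀ (k : Int) (dungeons : List (List Int)), Dom_solution k dungeons → Pre_solution k dungeons → Spec_solution k dungeons (solution k dungeons)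

-- ===== LEMMAS AND PROOFS =====

theorem solInner_acc (tmpK : Int) (seqes : List (List Int)) (c : Int) :
    solInner tmpK seqes c = c + solInner tmpK seqes 0 := by
  induction seqes generalizing tmpK c with
  | nil => simp [solInner]
  | cons d rest ih =>
    simp only [solInner]
    split
    · rw [ih _ (c + 1), ih _ (0 + 1)]; ring
    · omega

theorem solInner_nonneg (tmpK : Int) (seqes : List (List Int)) :
    0 ≤ solInner tmpK seqes 0 := by
  induction seqes generalizing tmpK with
  | nil => simp [solInner]
  | cons d rest ih =>
    simp only [solInner]
    split
    · rw [solInner_acc]; have := ih (tmpK - PySem.List.pyGetD d 1 0); omega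
    · omega

-- generic fold bounds
theorem foldl_le_of_step {γ : Type} (l : List γ) (s : Int → γ → Int) (b a : Int)
    (ha : a ≤ b) (hs : ∀ a' x, x ∈ l → a' ≤ b → s a' x ≤ b) : l.foldl s a ≤ b := by
  induction l generalizing a with
  | nil => simpa using ha
  | cons x xs ih =>
    simp only [List.foldl_cons]
    exact ih (s a x) (hs a x (by simp) ha) (fun a' y hy => hs a' y (by simp [hy]))

theorem le_foldl_of_mono {γ : Type} (l : List γ) (s : Int → γ → Int) (a : Int)
    (hmono : ∀ a' x, x ∈ l → a' ≤ s a' x) : a ≤ l.foldl s a := by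
  induction l generalizing a with
  | nil => simp
  | cons x xs ih =>
    simp only [List.foldl_cons]
    exact le_trans (hmono a x (by simp))
      (ih (s a x) (fun a' y hy => hmono a' y (by simp [hy])))

theorem mem_le_foldl {γ : Type} (l : List γ) (s : Int → γ → Int) (a v : Int) (x : γ)
    (hx : x ∈ l) (hv : ∀ a', v ≤ s a' x) (hmono : ∀ a' y, y ∈ l → a' ≤ s a' y) :
    v ≤ l.foldl s a := by
  induction l generalizing a with
  | nil => cases hx
  | cons y ys ih =>
    simp only [List.foldl_cons]
    rcases List.mem_cons.mp hx with rfl | hx'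
    · exact le_trans (hv a)
        (le_foldl_of_mono ys s (s a x) (fun a' z hz => hmono a' z (by simp [hz])))
    · exact ih (s a y) hx' (fun a' z hz => hmono a' z (by simp [hz]))

theorem foldl_max_achieved {γ : Type} (l : List γ) (f : γ → Int) (a : Int) :
    l.foldl (fun acc y => max acc (f y)) a = a ∨
      ∃ y ∈ l, l.foldl (fun acc y => max acc (f y)) a = f y := by
  induction l generalizing a with
  | nil => left; rfl
  | cons x xs ih =>
    simp only [List.foldl_cons]
    rcases ih (max a (f x)) with h | ⟨y, hy, h⟩
    · rcases max_choice a (f x) with hm | hm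
      · left; rw [h, hm]
      · right; exact ⟨x, by simp, by rw [h, hm]⟩
    · right; exact ⟨y, by simp [hy], h⟩

-- dfs monotone step / nonneg
theorem solDfs_nonneg (e : Int) (rem : List (List Int)) : 0 ≤ solDfs e rem := by
  rw [solDfs]
  apply le_foldl_of_mono
  intro a' x _
  dsimp only
  split
  · exact le_max_left _ _
  · exact le_refl _

-- the permutations list is never empty (for r = length)
theorem perms_ne_nil (xs : List (List Int)) :
    PySem.List.permutations xs xs.length ≠ [] := by
  induction hn : xs.length generalizing xs with
  | zero =>
    rw [PySem.List.permutations]; simp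
  | succ m ih =>
    rw [PySem.List.permutations]
    have h0 : xs[0]? = some (xs.getD 0 []) := by
      have : 0 < xs.length := by omega
      simp [List.getD_eq_getElem?_getD, List.getElem?_eq_getElem this]
    intro hcontra
    have h0mem : (0 : ℕ) ∈ List.range xs.length := by
      simp; omega
    have := List.flatMap_eq_nil_iff.mp hcontra _ h0mem
    rw [h0] at this
    simp only [List.map_eq_nil_iff] at this
    exact ih (xs.eraseIdx 0) (by rw [List.length_eraseIdx_of_lt (by omega)]; omega) this

-- membership: cons of the i-th element over a sub-permutation
theorem cons_mem_perms (xs : List (List Int)) (i : ℕ) (hi : i < xs.length)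
    (p : List (List Int)) (hp : p ∈ PySem.List.permutations (xs.eraseIdx i) (xs.length - 1)) :
    xs[i] :: p ∈ PySem.List.permutations xs xs.length := by
  have hlen : xs.length = (xs.length - 1) + 1 := by omega
  rw [hlen, PySem.List.permutations]
  apply List.mem_flatMap.mpr
  refine ⟨i, by simp [List.mem_range]; omega, ?_⟩
  rw [List.getElem?_eq_getElem hi]
  exact List.mem_map.mpr ⟨p, hp, rfl⟩

-- A's value as a named fold
def aVal (k : Int) (xs : List (List Int)) : Int :=
  (PySem.List.permutations xs xs.length).foldl (fun ans s => max ans (solInner k s 0)) 0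

theorem aVal_mono_step (k : Int) (xs : List (List Int)) :
    ∀ a' (y : List (List Int)), y ∈ PySem.List.permutations xs xs.length →
      a' ≤ max a' (solInner k y 0) := fun a' y _ => le_max_left _ _

theorem mem_le_aVal (k : Int) (xs p : List (List Int))
    (hp : p ∈ PySem.List.permutations xs xs.length) : solInner k p 0 ≤ aVal k xs :=
  mem_le_foldl _ _ _ _ p hp (fun _ => le_max_right _ _) (aVal_mono_step k xs)

-- direction 1: every permutation's greedy count is at most the dfs value
theorem solInner_le_solDfs (p : List (List Int)) :
    ∀ (k : Int) (rem : List (List Int)), p.Perm rem → solInner k p 0 ≤ solDfs k rem := by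
  induction p with
  | nil =>
    intro k rem hperm
    have := hperm.symm.eq_nil
    subst this
    simp [solInner, solDfs_nonneg]
  | cons d rest ih =>
    intro k rem hperm
    have hd : d ∈ rem := hperm.mem_iff.mp (by simp)
    have hidx : rem.idxOf d < rem.length := List.idxOf_lt_length_of_mem hd
    have hget : rem[rem.idxOf d] = d := List.getElem_idxOf hidx
    have herase : rem.eraseIdx (rem.idxOf d) = rem.erase d := (List.erase_eq_eraseIdx_of_idxOf rfl).symm
    have hrest : rest.Perm (rem.erase d) := (hperm.trans (List.perm_cons_erase hd)).cons_inv
    simp only [solInner]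
    split
    · rename_i haff
      rw [solInner_acc]
      have hrec := ih (k - PySem.List.pyGetD d 1 0) (rem.erase d) hrest
      have hbranch : 1 + solDfs (k - PySem.List.pyGetD d 1 0) (rem.eraseIdx (rem.idxOf d)) ≤ solDfs k rem := by
        conv_rhs => rw [solDfs]
        apply mem_le_foldl _ _ _ _ (⟨rem.idxOf d, List.mem_range.mpr hidx⟩ : {x // x ∈ List.range rem.length})
        · exact List.mem_attach _ _
        · intro a'
          dsimp only
          rw [List.getD_eq_getElem _ _ hidx, hget]
          rw [if_pos haff]
          exact le_trans (le_refl _) (le_max_right _ _)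
        · intro a' y _
          dsimp only
          split
          · exact le_max_left _ _
          · exact le_refl _
      rw [herase] at hbranch
      omega
    · exact solDfs_nonneg _ _

-- direction 2: the dfs value is at most A's fold over all permutations
theorem solDfs_le_aVal (k : Int) (rem : List (List Int)) : solDfs k rem ≤ aVal k rem := by
  induction hn : rem.length using Nat.strong_induction_on generalizing rem k with
  | _ n ihn =>
  rw [solDfs]
  apply foldl_le_of_step
  · -- 0 ≤ aVal
    exact le_foldl_of_mono _ _ _ (aVal_mono_step k rem)
  · intro a' i hi ha'
    dsimp only
    split
    · rename_i haff
      apply max_le ha'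
      have hilt : i.1 < rem.length := List.mem_range.mp i.2
      have hget : rem.getD i.1 [] = rem[i.1] := List.getD_eq_getElem _ _ hilt
      set e' := k - PySem.List.pyGetD (rem.getD i.1 []) 1 0 with he'
      have hsub : (rem.eraseIdx i.1).length = rem.length - 1 := List.length_eraseIdx_of_lt hilt
      have hrec : solDfs e' (rem.eraseIdx i.1) ≤ aVal e' (rem.eraseIdx i.1) := by
        apply ihn (rem.eraseIdx i.1).length (by omega) _ _ rfl
      -- find a permutation of the remainder achieving at least aVal e' (eraseIdx)
      have hne := perms_ne_nil (rem.eraseIdx i.1)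
      obtain ⟨p', hp', hge⟩ :
          ∃ p' ∈ PySem.List.permutations (rem.eraseIdx i.1) (rem.eraseIdx i.1).length,
            aVal e' (rem.eraseIdx i.1) ≤ solInner e' p' 0 := by
        rcases foldl_max_achieved (PySem.List.permutations (rem.eraseIdx i.1) (rem.eraseIdx i.1).length)
            (fun s => solInner e' s 0) 0 with h0 | ⟨y, hy, hyv⟩
        · obtain ⟨q, hq⟩ := List.exists_mem_of_ne_nil _ hne
          exact ⟨q, hq, by rw [aVal, h0]; exact solInner_nonneg _ _⟩
        · exact ⟨y, hy, le_of_eq hyv⟩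
      have hmem : rem[i.1] :: p' ∈ PySem.List.permutations rem rem.length := by
        apply cons_mem_perms rem i.1 hilt
        rw [← hsub]; exact hp'
      have hval : solInner k (rem[i.1] :: p') 0 = 1 + solInner e' p' 0 := by
        simp only [solInner]
        rw [if_pos (by rw [← hget]; exact haff)]
        rw [solInner_acc, he', hget]
        ring
      have := mem_le_aVal k rem _ hmem
      rw [hval] at this
      omega
    · exact ha'

-- ===== VERDICT (by name: the statement is the Claim_ definition above) =====
theorem solution_spec : Claim_equal_solution := by
  intro k dungeons _ _
  unfold Spec_solution solution solution_alt
  have h1 : solDfs k dungeons ≤ aVal k dungeons := solDfs_le_aVal k dungeons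
  have h2 : aVal k dungeons ≤ solDfs k dungeons := by
    unfold aVal
    apply foldl_le_of_step
    · exact solDfs_nonneg k dungeons
    · intro a' p hp ha'
      exact max_le ha' (solInner_le_solDfs p k dungeons
        (PySem.List.perm_of_mem_permutations hp))
  show aVal k dungeons = solDfs k dungeons
  omega
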